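-- pv_equiv track=rewrite | github.com/Ag3497120/verantyx-v6 | arc/grid.py | place_subgrid
-- ===== SOURCE A (Python) =====
-- from typing import List, Tuple, Optional, Set
-- import copy
--
-- Grid = List[List[int]]
--
-- def place_subgrid(g: Grid, sub: Grid, r: int, c: int) -> Grid:
--     """Place subgrid at position (r, c), returns new grid"""
--     result = copy.deepcopy(g)
--     for sr in range(len(sub)):
--         for sc in range(len(sub[0])):
--             tr, tc = r + sr, c + sc
--             if 0 <= tr < len(result) and 0 <= tc < len(result[0]):
--                 result[tr][tc] = sub[sr][sc]
--     return result
-- ===== SOURCE B (Python) =====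
-- def place_subgrid(g, sub, r, c):
--     """Place subgrid at position (r, c), returns new grid"""
--     sub_rows = len(sub)
--     sub_cols = len(sub[0]) if sub else 0
--     cols = len(g[0]) if g else 0
--     return [[sub[i - r][j - c]
--              if r <= i < r + sub_rows and c <= j < c + sub_cols and j < cols
--              else cell
--              for j, cell in enumerate(row)]
--             for i, row in enumerate(g)]
-- ===== Notes on version B (the rewrite author's own statement) =====
-- stated objective: simpler
-- what changed: Replaces deepcopy-then-overwrite (nested loop over subgrid cells mutating a copy) by a single pure double comprehension over the whole grid that decides each cell by membership in the placement window clipped to the grid's len(g)-by-len(g[0]) bounding box; Pre_ excludes only the inputs where A raises IndexError (a window cell falling beyond a short row of g, or a needed sub entry beyond a short row of sub).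
import Mathlib
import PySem

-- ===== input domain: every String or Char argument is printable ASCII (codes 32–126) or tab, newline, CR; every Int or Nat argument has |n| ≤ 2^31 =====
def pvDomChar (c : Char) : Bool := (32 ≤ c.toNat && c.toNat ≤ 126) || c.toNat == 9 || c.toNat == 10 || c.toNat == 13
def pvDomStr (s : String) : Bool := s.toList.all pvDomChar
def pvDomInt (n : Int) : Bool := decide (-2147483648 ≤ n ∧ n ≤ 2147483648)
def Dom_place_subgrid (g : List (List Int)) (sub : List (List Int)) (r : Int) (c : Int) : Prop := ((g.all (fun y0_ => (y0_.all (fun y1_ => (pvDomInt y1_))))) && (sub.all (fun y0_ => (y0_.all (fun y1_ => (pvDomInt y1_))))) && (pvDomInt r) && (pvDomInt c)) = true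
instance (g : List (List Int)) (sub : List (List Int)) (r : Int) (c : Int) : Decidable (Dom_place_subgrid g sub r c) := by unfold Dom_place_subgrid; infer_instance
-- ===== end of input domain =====

-- B replaces A's deepcopy-then-overwrite with one pure double comprehension deciding each cell
-- by membership in the placement window clipped to the len(g)×len(g[0]) box (objective: simpler).

-- ===== PORT A =====
-- inner loop body: `result[tr][tc] = sub[sr][sc]` guarded by the bounds test (tr = r + sr,
-- tc = c + sc inlined); under Pre_ the guarded indices are in range, so `set`/`getD` are exact
def pvAinner (sub : List (List Int)) (r c sr : Int) (res2 : List (List Int)) (sc : Int) : List (List Int) :=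
  if 0 ≤ r + sr ∧ r + sr < (res2.length : Int) ∧ 0 ≤ c + sc ∧ c + sc < ((res2.headD []).length : Int) then
    res2.set (r + sr).toNat ((res2.getD (r + sr).toNat []).set (c + sc).toNat ((sub.getD sr.toNat []).getD sc.toNat 0))
  else res2

-- `for sc in range(len(sub[0]))`; Python evaluates sub[0] only when this row loop runs,
-- i.e. when sub is nonempty, where headD [] is exact
def pvAouter (sub : List (List Int)) (r c : Int) (res : List (List Int)) (sr : Int) : List (List Int) :=
  (PySem.List.pyRange 0 (((sub.headD []).length : Int)) 1).foldl (pvAinner sub r c sr) res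

def place_subgrid (g : List (List Int)) (sub : List (List Int)) (r : Int) (c : Int) : List (List Int) :=
  (PySem.List.pyRange 0 ((sub.length : Int)) 1).foldl (pvAouter sub r c) g

-- ===== PORT B =====
def place_subgrid_alt (g : List (List Int)) (sub : List (List Int)) (r : Int) (c : Int) : List (List Int) :=
  let subRows : Int := sub.length
  let subCols : Int := if sub.isEmpty then 0 else ((sub.headD []).length : Int)
  let cols : Int := if g.isEmpty then 0 else ((g.headD []).length : Int)
  (PySem.List.enumerate g).map (fun p =>
    (PySem.List.enumerate p.2).map (fun q =>
      if r ≤ p.1 ∧ p.1 < r + subRows ∧ c ≤ q.1 ∧ q.1 < c + subCols ∧ q.1 < cols then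
        (sub.getD (p.1 - r).toNat []).getD (q.1 - c).toNat 0
      else q.2))

-- ===== PRECONDITION & SPEC =====
-- Pre_ holds exactly when Python A returns normally: for every cell (i, j) of the
-- len(g)×len(g[0]) box that lies in the placement window, the write target g[i][j] and the
-- entry sub[i-r][j-c] it reads must both exist; otherwise A raises IndexError (short row of
-- g or of sub).
def Pre_place_subgrid (g : List (List Int)) (sub : List (List Int)) (r : Int) (c : Int) : Prop :=
  ∀ i ∈ List.range g.length, ∀ j ∈ List.range (g.headD []).length,
    (r ≤ (i : Int) ∧ (i : Int) < r + (sub.length : Int) ∧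
     c ≤ (j : Int) ∧ (j : Int) < c + ((sub.headD []).length : Int)) →
    j < (g.getD i []).length ∧ ((j : Int) - c).toNat < (sub.getD ((i : Int) - r).toNat []).length
instance (g : List (List Int)) (sub : List (List Int)) (r : Int) (c : Int) : Decidable (Pre_place_subgrid g sub r c) := by unfold Pre_place_subgrid; infer_instance

def pvWitness_place_subgrid : List (List Int) × List (List Int) × Int × Int := ([[1,2],[3,4]], [[9]], 0, 1)

def Spec_place_subgrid (g : List (List Int)) (sub : List (List Int)) (r : Int) (c : Int) (out : List (List Int)) : Prop := out = place_subgrid_alt g sub r c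
instance (g : List (List Int)) (sub : List (List Int)) (r : Int) (c : Int) (out : List (List Int)) : Decidable (Spec_place_subgrid g sub r c out) := by unfold Spec_place_subgrid; infer_instance

-- ===== CLAIM (what is proved, stated in full; the proofs are below) =====
def Claim_equal_place_subgrid : Prop := ∀ (g : List (List Int)) (sub : List (List Int)) (r : Int) (c : Int), Dom_place_subgrid g sub r c → Pre_place_subgrid g sub r c → Spec_place_subgrid g sub r c (place_subgrid g sub r c)

-- ===== LEMMAS AND PROOFS =====

-- `res` has the same row/column structure as `g`
def pvShape (g res : List (List Int)) : Prop :=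
  res.length = g.length ∧ ∀ k : Nat, (res.getD k []).length = (g.getD k []).length

def pvCell (res : List (List Int)) (i j : Nat) : Int := (res.getD i []).getD j 0

def pvSubCell (sub : List (List Int)) (r c : Int) (i j : Nat) : Int :=
  (sub.getD ((i : Int) - r).toNat []).getD ((j : Int) - c).toNat 0

lemma pvAinner_shape (g sub : List (List Int)) (r c sr sc : Int) (res : List (List Int))
    (h : pvShape g res) : pvShape g (pvAinner sub r c sr res sc) := by
  obtain ⟨hlen, hrows⟩ := h
  unfold pvAinner
  split_ifs with hgu
  · refine ⟨by simpa using hlen, fun k => ?_⟩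
    by_cases hk : (r + sr).toNat = k
    · subst hk
      have ht : (r + sr).toNat < res.length := by omega
      simp only [List.getD, List.getElem?_set_self ht, Option.getD_some, List.length_set]
      simpa [List.getD] using hrows _
    · simpa [List.getD, List.getElem?_set_ne hk] using hrows k
  · exact ⟨hlen, hrows⟩

lemma pvAinner_cell (g sub : List (List Int)) (r c sr sc : Int) (res : List (List Int))
    (hpre : Pre_place_subgrid g sub r c) (h : pvShape g res)
    (hsr : 0 ≤ sr ∧ sr < (sub.length : Int))
    (hsc : 0 ≤ sc ∧ sc < ((sub.headD []).length : Int))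
    (i j : Nat) (hi : i < g.length) :
    pvCell (pvAinner sub r c sr res sc) i j =
      if (i : Int) = r + sr ∧ (j : Int) = c + sc ∧ (j : Int) < ((g.headD []).length : Int)
      then pvSubCell sub r c i j else pvCell res i j := by
  obtain ⟨hlen, hrows⟩ := h
  have h0 : ∀ (l : List (List Int)), l.headD [] = l.getD 0 [] := by
    intro l; cases l <;> simp [List.getD]
  have hhead : (res.headD []).length = (g.headD []).length := by rw [h0, h0]; exact hrows 0
  unfold pvAinner pvCell pvSubCell
  split_ifs with hgu hc hc
  · obtain ⟨hc1, hc2, hc3⟩ := hc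
    have hieq : (r + sr).toNat = i := by omega
    have hjeq : (c + sc).toNat = j := by omega
    have hi' : i < res.length := by omega
    have hwin := hpre i (List.mem_range.mpr hi) j (List.mem_range.mpr (by omega))
      ⟨by omega, by omega, by omega, by omega⟩
    have hrowlen : j < (res.getD i []).length := by rw [hrows i]; exact hwin.1
    have hsr' : ((i : Int) - r).toNat = sr.toNat := by omega
    have hsc' : ((j : Int) - c).toNat = sc.toNat := by omega
    rw [hieq, hjeq, hsr', hsc']
    simp only [List.getD, List.getElem?_set_self hi', Option.getD_some]
    simp [List.getElem?_set_self (show j < (res[i]?.getD []).length by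
      simpa [List.getD] using hrowlen)]
  · by_cases hri : (r + sr).toNat = i
    · have hi' : i < res.length := by omega
      have hj' : (c + sc).toNat ≠ j := by omega
      rw [hri]
      simp [List.getD, List.getElem?_set_self hi', List.getElem?_set_ne hj']
    · simp [List.getD, List.getElem?_set_ne hri]
  · exfalso; omega
  · rfl

lemma pvInner_fold (g sub : List (List Int)) (r c sr : Int)
    (hpre : Pre_place_subgrid g sub r c)
    (hsr : 0 ≤ sr ∧ sr < (sub.length : Int))
    (L : List Int) (hL : ∀ sc ∈ L, 0 ≤ sc ∧ sc < ((sub.headD []).length : Int))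
    (res : List (List Int)) (h : pvShape g res) :
    pvShape g (L.foldl (pvAinner sub r c sr) res) ∧
    ∀ i j : Nat, i < g.length →
      pvCell (L.foldl (pvAinner sub r c sr) res) i j =
        if (i : Int) = r + sr ∧ (∃ sc ∈ L, (j : Int) = c + sc) ∧ (j : Int) < ((g.headD []).length : Int)
        then pvSubCell sub r c i j
        else pvCell res i j := by
  induction L generalizing res with
  | nil => exact ⟨h, fun i j hi => by simp⟩
  | cons sc L ih =>
    obtain ⟨ihs, ihc⟩ := ih (fun x hx => hL x (List.mem_cons_of_mem _ hx))
      (pvAinner sub r c sr res sc) (pvAinner_shape g sub r c sr sc res h)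
    refine ⟨by simpa using ihs, fun i j hi => ?_⟩
    have hcell := pvAinner_cell g sub r c sr sc res hpre h hsr (hL sc List.mem_cons_self) i j hi
    simp only [List.foldl_cons]
    rw [ihc i j hi, hcell]
    by_cases h1 : (i : Int) = r + sr <;>
      by_cases h2 : ∃ sc' ∈ L, (j : Int) = c + sc' <;>
        by_cases h3 : (j : Int) = c + sc <;>
          by_cases h4 : (j : Int) < ((g.headD []).length : Int) <;>
            simp [h1, h2, h3, h4, List.mem_cons] <;> intros <;> omega

lemma pvOuter_fold (g sub : List (List Int)) (r c : Int)
    (hpre : Pre_place_subgrid g sub r c)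
    (L : List Int) (hL : ∀ sr ∈ L, 0 ≤ sr ∧ sr < (sub.length : Int))
    (res : List (List Int)) (h : pvShape g res) :
    pvShape g (L.foldl (pvAouter sub r c) res) ∧
    ∀ i j : Nat, i < g.length →
      pvCell (L.foldl (pvAouter sub r c) res) i j =
        if (∃ sr ∈ L, (i : Int) = r + sr) ∧ c ≤ (j : Int) ∧ (j : Int) < c + ((sub.headD []).length : Int) ∧
           (j : Int) < ((g.headD []).length : Int)
        then pvSubCell sub r c i j else pvCell res i j := by
  induction L generalizing res with
  | nil => exact ⟨h, fun i j hi => by simp⟩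
  | cons sr L ih =>
    have hstep := pvInner_fold g sub r c sr hpre (hL sr List.mem_cons_self)
      (PySem.List.pyRange 0 (((sub.headD []).length : Int)) 1)
      (fun sc hsc => by simpa [PySem.List.mem_pyRange_one] using hsc) res h
    obtain ⟨hss, hsc⟩ := hstep
    obtain ⟨ihs, ihc⟩ := ih (fun x hx => hL x (List.mem_cons_of_mem _ hx))
      (pvAouter sub r c res sr) (by simpa [pvAouter] using hss)
    refine ⟨by simpa using ihs, fun i j hi => ?_⟩
    simp only [List.foldl_cons]
    rw [ihc i j hi]
    have hin : pvCell (pvAouter sub r c res sr) i j =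
        if (i : Int) = r + sr ∧ (c ≤ (j : Int) ∧ (j : Int) < c + ((sub.headD []).length : Int)) ∧
           (j : Int) < ((g.headD []).length : Int)
        then pvSubCell sub r c i j else pvCell res i j := by
      rw [pvAouter, hsc i j hi]
      congr 1
      simp only [PySem.List.mem_pyRange_one, eq_iff_iff]
      constructor
      · rintro ⟨hx, ⟨sc, ⟨h1, h2⟩, h3⟩, h4⟩; exact ⟨hx, ⟨by omega, by omega⟩, h4⟩
      · rintro ⟨hx, ⟨h1, h2⟩, h4⟩; exact ⟨hx, ⟨(j : Int) - c, by omega, by omega⟩, h4⟩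
    rw [hin]
    by_cases h1 : ∃ sr' ∈ L, (i : Int) = r + sr' <;>
      by_cases h2 : (i : Int) = r + sr <;>
        by_cases h3 : c ≤ (j : Int) ∧ (j : Int) < c + ((sub.headD []).length : Int) <;>
          by_cases h4 : (j : Int) < ((g.headD []).length : Int) <;>
            simp [h1, h2, h3, h4, List.mem_cons] <;> intros <;> omega

lemma pvA_spec (g sub : List (List Int)) (r c : Int)
    (hpre : Pre_place_subgrid g sub r c) :
    pvShape g (place_subgrid g sub r c) ∧
    ∀ i j : Nat, i < g.length →
      pvCell (place_subgrid g sub r c) i j =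
        if r ≤ (i : Int) ∧ (i : Int) < r + (sub.length : Int) ∧
           c ≤ (j : Int) ∧ (j : Int) < c + ((sub.headD []).length : Int) ∧
           (j : Int) < ((g.headD []).length : Int)
        then pvSubCell sub r c i j else pvCell g i j := by
  have h := pvOuter_fold g sub r c hpre (PySem.List.pyRange 0 ((sub.length : Int)) 1)
    (fun sr hsr => by simpa [PySem.List.mem_pyRange_one] using hsr) g ⟨rfl, fun _ => rfl⟩
  obtain ⟨hs, hc⟩ := h
  refine ⟨by simpa [place_subgrid] using hs, fun i j hi => ?_⟩
  rw [place_subgrid, hc i j hi]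
  congr 1
  simp only [PySem.List.mem_pyRange_one, eq_iff_iff]
  constructor
  · rintro ⟨⟨sr, ⟨h1, h2⟩, h3⟩, h4, h5, h6⟩; exact ⟨by omega, by omega, h4, h5, h6⟩
  · rintro ⟨h1, h2, h3, h4, h5⟩; exact ⟨⟨(i : Int) - r, by omega, by omega⟩, h3, h4, h5⟩

lemma pvB_spec (g sub : List (List Int)) (r c : Int) :
    pvShape g (place_subgrid_alt g sub r c) ∧
    ∀ i j : Nat, i < g.length → j < (g.getD i []).length →
      pvCell (place_subgrid_alt g sub r c) i j =
        if r ≤ (i : Int) ∧ (i : Int) < r + (sub.length : Int) ∧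
           c ≤ (j : Int) ∧ (j : Int) < c + ((sub.headD []).length : Int) ∧
           (j : Int) < ((g.headD []).length : Int)
        then pvSubCell sub r c i j else pvCell g i j := by
  have hlen : (place_subgrid_alt g sub r c).length = g.length := by
    simp [place_subgrid_alt, PySem.List.length_enumerate]
  refine ⟨⟨hlen, fun k => ?_⟩, fun i j hi hj => ?_⟩
  · by_cases hk : k < g.length
    · rw [List.getD_eq_getElem _ _ (by omega : k < (place_subgrid_alt g sub r c).length),
        List.getD_eq_getElem _ _ hk]
      simp [place_subgrid_alt, List.getElem_map, PySem.List.getElem_enumerate,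
        PySem.List.length_enumerate]
    · rw [List.getD_eq_default _ _ (by omega), List.getD_eq_default _ _ (by omega)]
  · have hji : j < g[i].length := by rwa [List.getD_eq_getElem _ _ hi] at hj
    rw [pvCell, List.getD_eq_getElem _ _ (by omega : i < (place_subgrid_alt g sub r c).length)]
    have hgne : ¬ g.isEmpty := by
      cases g with
      | nil => simp at hi
      | cons a l => simp
    have halt : (place_subgrid_alt g sub r c)[i]'(by omega) =
        (PySem.List.enumerate g[i]).map (fun q =>
          if r ≤ (0 + (i : Int)) ∧ (0 + (i : Int)) < r + (sub.length : Int) ∧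
             c ≤ q.1 ∧ q.1 < c + (if sub.isEmpty then (0 : Int) else ((sub.headD []).length : Int)) ∧
             q.1 < (if g.isEmpty then (0 : Int) else ((g.headD []).length : Int))
          then (sub.getD ((0 + (i : Int)) - r).toNat []).getD ((q.1 : Int) - c).toNat 0
          else q.2) := by
      simp [place_subgrid_alt, List.getElem_map, PySem.List.getElem_enumerate]
    rw [halt, List.getD_eq_getElem _ _ (by
      simpa [PySem.List.length_enumerate] using hji)]
    have hsubc : (if sub.isEmpty then (0 : Int) else ((sub.headD []).length : Int)) =
        ((sub.headD []).length : Int) := by cases sub <;> simp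
    have hcols : (if g.isEmpty then (0 : Int) else ((g.headD []).length : Int)) =
        ((g.headD []).length : Int) := by simp [hgne]
    simp only [List.getElem_map, PySem.List.getElem_enumerate, hsubc, hcols, zero_add]
    split_ifs <;>
      first
        | simp [pvSubCell]
        | rw [pvCell, List.getD_eq_getElem _ _ hi, List.getD_eq_getElem _ _ hji]

-- shape + cells determine the grid
lemma pvShape_ext (g a b : List (List Int)) (ha : pvShape g a) (hb : pvShape g b)
    (hc : ∀ i j : Nat, i < g.length → j < (g.getD i []).length → pvCell a i j = pvCell b i j) :
    a = b := by
  obtain ⟨hal, har⟩ := ha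
  obtain ⟨hbl, hbr⟩ := hb
  apply List.ext_getElem (by omega)
  intro i h1 h2
  have hi : i < g.length := by omega
  have hla : (a.getD i []).length = (g.getD i []).length := har i
  have hlb : (b.getD i []).length = (g.getD i []).length := hbr i
  rw [List.getD_eq_getElem _ _ h1] at hla
  rw [List.getD_eq_getElem _ _ h2] at hlb
  apply List.ext_getElem (by omega)
  intro j hj1 hj2
  have hjg : j < (g.getD i []).length := by omega
  have hcell := hc i j hi hjg
  simp only [pvCell] at hcell
  rw [List.getD_eq_getElem _ _ h1, List.getD_eq_getElem _ _ h2,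
    List.getD_eq_getElem _ _ hj1, List.getD_eq_getElem _ _ hj2] at hcell
  exact hcell

-- ===== VERDICT (by name: the statement is the Claim_ definition above) =====
theorem place_subgrid_spec : Claim_equal_place_subgrid := by
  intro g sub r c _ hpre
  unfold Spec_place_subgrid
  obtain ⟨hsa, hca⟩ := pvA_spec g sub r c hpre
  obtain ⟨hsb, hcb⟩ := pvB_spec g sub r c
  apply pvShape_ext g _ _ hsa hsb
  intro i j hi hj
  rw [hca i j hi, hcb i j hi hj]
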